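-- pv_equiv track=rewrite | github.com/jeffrey-hsiao/alignment-experiment | pipelines/audit_dataset.py | is_repetitive
-- ===== SOURCE A (Python) =====
-- def max_consecutive_repeat(text: str) -> tuple[int, str]:
--     """回傳最長連續重複字元的長度與該字元。"""
--     if not text:
--         return 0, ""
--     max_run, cur_run = 1, 1
--     max_char = cur_char = text[0]
--     for ch in text[1:]:
--         if ch == cur_char:
--             cur_run += 1
--             if cur_run > max_run:
--                 max_run, max_char = cur_run, cur_char
--         else:
--             cur_run, cur_char = 1, ch
--     return max_run, max_char
--
-- def is_repetitive(record: dict, threshold: int) -> list[tuple[str, int, str]]: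
--     """
--     回傳有重複問題的欄位清單，每項為 (欄位名, 最長連續長度, 重複字元)。
--     """
--     bad = []
--     for field in ("chosen", "rejected"):
--         val = record.get(field, "") or ""
--         run, ch = max_consecutive_repeat(val)
--         if run >= threshold:
--             bad.append((field, run, ch))
--     return bad
-- ===== SOURCE B (Python) =====
-- def _runs(text):
--     """Split text into maximal runs of equal characters, as (char, length) pairs."""
--     if not text:
--         return []
--     c = text[0]
--     i = 1
--     while i < len(text) and text[i] == c:
--         i += 1
--     return [(c, i)] + _runs(text[i:])
--
-- def max_consecutive_repeat(text):
--     best_len, best_char = 0, ""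
--     for ch, ln in _runs(text):
--         if ln > best_len:
--             best_len, best_char = ln, ch
--     return best_len, best_char
--
-- def is_repetitive(record, threshold):
--     bad = []
--     for field in ("chosen", "rejected"):
--         run, ch = max_consecutive_repeat(record.get(field, "") or "")
--         if run >= threshold:
--             bad.append((field, run, ch))
--     return bad
-- ===== Notes on version B (the rewrite author's own statement) =====
-- stated objective: alternative
-- what changed: max_consecutive_repeat is rewritten group-based: the string is first split recursively into maximal runs of equal characters and the first longest run is then selected by a simple fold, replacing A's single-pass running-counter/maximum-tracking loop.
import Mathlib
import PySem

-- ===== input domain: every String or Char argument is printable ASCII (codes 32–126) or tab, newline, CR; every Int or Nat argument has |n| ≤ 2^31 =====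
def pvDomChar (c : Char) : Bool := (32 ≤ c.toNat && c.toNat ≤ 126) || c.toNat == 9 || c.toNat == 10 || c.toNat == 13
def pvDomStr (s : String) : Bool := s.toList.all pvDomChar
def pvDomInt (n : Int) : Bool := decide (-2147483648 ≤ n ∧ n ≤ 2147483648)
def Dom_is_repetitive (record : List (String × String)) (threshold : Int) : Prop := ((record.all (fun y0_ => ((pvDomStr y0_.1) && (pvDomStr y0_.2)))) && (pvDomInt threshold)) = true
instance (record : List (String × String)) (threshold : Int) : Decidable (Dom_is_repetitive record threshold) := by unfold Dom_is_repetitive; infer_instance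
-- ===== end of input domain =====

-- B replaces A's running-counter loop in max_consecutive_repeat by a recursive split into
-- maximal runs followed by a first-longest selection fold (objective: alternative, same cost).

-- ===== PORT A =====
-- the for-loop of max_consecutive_repeat: state (max_run, max_char, cur_run, cur_char)
def mcrLoopA : List Char → Int → Char → Int → Char → Int × Char
  | [], maxR, maxC, _, _ => (maxR, maxC)
  | ch :: rest, maxR, maxC, curR, curC =>
    if ch = curC then
      if curR + 1 > maxR then mcrLoopA rest (curR + 1) curC (curR + 1) curC
      else mcrLoopA rest maxR maxC (curR + 1) curC
    else mcrLoopA rest maxR maxC 1 ch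

def mcrA (text : List Char) : Int × String :=
  match text with
  | [] => (0, "")
  | c :: rest =>
    let p := mcrLoopA rest 1 c 1 c
    (p.1, String.mk [p.2])

-- record.get(field, "") (first match; `or ""` is the identity on strings already "" by default)
def is_repetitive (record : List (String × String)) (threshold : Int) : List (String × Int × String) :=
  [("chosen" : String), "rejected"].foldl (fun bad field =>
    let val := (PySem.Dict.mk record).getD field ""
    let rc := mcrA val.toList
    if threshold ≤ rc.1 then bad ++ [(field, rc.1, rc.2)] else bad) []

-- ===== PORT B =====
-- _runs: split into maximal runs of equal characters (the inner while loop = takeWhile/dropWhile)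
def altRuns : List Char → List (Char × Int)
  | [] => []
  | c :: rest =>
    (c, 1 + ((rest.takeWhile (· == c)).length : Int)) :: altRuns (rest.dropWhile (· == c))
termination_by l => l.length
decreasing_by
  simp only [List.length_cons]
  exact Nat.lt_succ_of_le (List.length_dropWhile_le _ _)

def mcrB (text : List Char) : Int × String :=
  (altRuns text).foldl
    (fun best p => if p.2 > best.1 then (p.2, String.mk [p.1]) else best) (0, "")

def is_repetitive_alt (record : List (String × String)) (threshold : Int) : List (String × Int × String) :=
  [("chosen" : String), "rejected"].foldl (fun bad field =>
    let val := (PySem.Dict.mk record).getD field ""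
    let rc := mcrB val.toList
    if threshold ≤ rc.1 then bad ++ [(field, rc.1, rc.2)] else bad) []

-- ===== PRECONDITION & SPEC =====
def Spec_is_repetitive (record : List (String × String)) (threshold : Int) (out : List (String × Int × String)) : Prop := out = is_repetitive_alt record threshold
instance (record : List (String × String)) (threshold : Int) (out : List (String × Int × String)) : Decidable (Spec_is_repetitive record threshold out) := by unfold Spec_is_repetitive; infer_instance

-- ===== CLAIM (what is proved, stated in full; the proofs are below) =====
def Claim_equal_is_repetitive : Prop := ∀ (record : List (String × String)) (threshold : Int), Dom_is_repetitive record threshold → Spec_is_repetitive record threshold (is_repetitive record threshold)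

-- ===== LEMMAS AND PROOFS =====

-- the Char-level best-run fold
def bestF (b : Int × Char) (rs : List (Char × Int)) : Int × Char :=
  rs.foldl (fun best p => if p.2 > best.1 then (p.2, p.1) else best) b

theorem mcrLoopA_runs :
    ∀ (l : List Char) (c : Char) (curR maxR : Int) (maxC : Char),
      1 ≤ curR → curR ≤ maxR →
      mcrLoopA l maxR maxC curR c =
        bestF (if curR + ((l.takeWhile (· == c)).length : Int) > maxR
               then (curR + ((l.takeWhile (· == c)).length : Int), c)
               else (maxR, maxC))
              (altRuns (l.dropWhile (· == c))) := by
  intro l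
  induction l with
  | nil =>
      intro c curR maxR maxC h1 h2
      simp [mcrLoopA, altRuns, bestF]
      omega
  | cons ch rest ih =>
      intro c curR maxR maxC h1 h2
      by_cases hc : ch = c
      · subst hc
        have hstep : mcrLoopA (ch :: rest) maxR maxC curR ch =
            if curR + 1 > maxR then mcrLoopA rest (curR + 1) ch (curR + 1) ch
            else mcrLoopA rest maxR maxC (curR + 1) ch := by
          simp [mcrLoopA]
        have htw : (ch :: rest).takeWhile (· == ch) = ch :: rest.takeWhile (· == ch) := by
          simp
        have hdw : (ch :: rest).dropWhile (· == ch) = rest.dropWhile (· == ch) := by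
          simp
        rw [hstep, htw, hdw]
        simp only [List.length_cons]
        push_cast
        set n : Int := ((rest.takeWhile (· == ch)).length : Int) with hn
        have hn0 : 0 ≤ n := Int.natCast_nonneg _
        have hsum : curR + 1 + n = curR + (n + 1) := by ring
        by_cases hgt : curR + 1 > maxR
        · rw [if_pos hgt, ih ch (curR + 1) (curR + 1) ch (by omega) le_rfl, ← hn]
          have e1 : (if curR + 1 + n > curR + 1 then (curR + 1 + n, ch) else (curR + 1, ch))
              = (curR + 1 + n, ch) := by
            by_cases h3 : curR + 1 + n > curR + 1
            · rw [if_pos h3]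
            · rw [if_neg h3]
              have hz : n = 0 := by omega
              rw [hz]
              norm_num
          rw [e1, hsum, if_pos (by omega : curR + (n + 1) > maxR)]
        · rw [if_neg hgt, ih ch (curR + 1) maxR maxC (by omega) (by omega), ← hn, hsum]
      · have hbe : (ch == c) = false := by simp [hc]
        have hstep : mcrLoopA (ch :: rest) maxR maxC curR c =
            mcrLoopA rest maxR maxC 1 ch := by
          simp [mcrLoopA, hc]
        have htw : (ch :: rest).takeWhile (· == c) = [] := by
          simp [hbe]
        have hdw : (ch :: rest).dropWhile (· == c) = ch :: rest := by
          simp [hbe]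
        rw [hstep, htw, hdw, ih ch 1 maxR maxC le_rfl (by omega)]
        simp only [List.length_nil, Nat.cast_zero, add_zero]
        rw [if_neg (by omega : ¬ curR > maxR)]
        rw [altRuns]
        simp only [bestF, List.foldl_cons]

-- stringified fold equals char-level fold (seeded with a one-char string)
theorem fold_str (rs : List (Char × Int)) :
    ∀ (r : Int) (c : Char),
      rs.foldl (fun best p => if p.2 > best.1 then (p.2, String.mk [p.1]) else best)
        (r, String.mk [c]) =
      ((bestF (r, c) rs).1, String.mk [(bestF (r, c) rs).2]) := by
  induction rs with
  | nil => intro r c; simp [bestF]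
  | cons p rest ih =>
      intro r c
      simp only [bestF] at ih ⊢
      simp only [List.foldl_cons]
      by_cases h : r < p.2
      · rw [if_pos h, if_pos h, ih]
      · rw [if_neg h, if_neg h, ih]

theorem mcrA_eq_mcrB (text : List Char) : mcrA text = mcrB text := by
  cases text with
  | nil => simp [mcrA, mcrB, altRuns]
  | cons c rest =>
      simp only [mcrA, mcrB]
      rw [altRuns]
      simp only [List.foldl_cons]
      have h1 : ((1 : Int) + ((rest.takeWhile (· == c)).length : Int) > 0) := by
        have : (0 : Int) ≤ ((rest.takeWhile (· == c)).length : Int) := Int.natCast_nonneg _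
        omega
      rw [if_pos h1, fold_str]
      rw [mcrLoopA_runs rest c 1 1 c le_rfl le_rfl]
      by_cases h2 : (1 : Int) + ((rest.takeWhile (· == c)).length : Int) > 1
      · rw [if_pos h2]
      · rw [if_neg h2]
        have hz : ((rest.takeWhile (· == c)).length : Int) = 0 := by omega
        rw [hz]
        norm_num

-- ===== VERDICT (by name: the statement is the Claim_ definition above) =====
theorem is_repetitive_spec : Claim_equal_is_repetitive := by
  intro record threshold _
  unfold Spec_is_repetitive is_repetitive is_repetitive_alt
  simp only [mcrA_eq_mcrB]
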